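-- pv_equiv track=rewrite | github.com/qm1210/Python-PTIT | PY01039 - KIỂM TRA SỐ ĐẸP.py | check
-- ===== SOURCE A (Python) =====
-- def check(s):
--     unit = set(s)
--     if len(unit) > 2:
--         return False
--     for i in range(0, len(s) - 2):
--         if s[i] != s[i + 2]:
--             return False
--     return True
-- ===== SOURCE B (Python) =====
-- def check(s):
--     # One pass: collect the characters at even and odd positions into two sets;
--     # the string is "beautiful" iff each parity class is uniform.
--     even, odd = set(), set()
--     for i, c in enumerate(s):
--         if i % 2 == 0:
--             even.add(c)
--         else:
--             odd.add(c)
--     return len(even) <= 1 and len(odd) <= 1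
-- ===== Notes on version B (the rewrite author's own statement) =====
-- stated objective: simpler
-- what changed: Replaced A's global distinct-character guard plus sliding s[i]==s[i+2] scan with a single pass that collects the even- and odd-indexed characters into two sets and checks each parity class is uniform.
import Mathlib
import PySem

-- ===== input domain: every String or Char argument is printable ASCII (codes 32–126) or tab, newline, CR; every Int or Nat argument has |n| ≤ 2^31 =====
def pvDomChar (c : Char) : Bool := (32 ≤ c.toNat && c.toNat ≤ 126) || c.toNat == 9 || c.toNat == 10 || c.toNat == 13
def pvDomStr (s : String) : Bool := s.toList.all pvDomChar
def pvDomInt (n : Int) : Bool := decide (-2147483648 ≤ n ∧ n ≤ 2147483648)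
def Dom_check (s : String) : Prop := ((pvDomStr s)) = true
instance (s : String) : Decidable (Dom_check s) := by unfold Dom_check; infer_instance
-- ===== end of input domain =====

-- B replaces the distinct-char guard + sliding s[i]==s[i+2] scan by one pass collecting
-- even/odd-position characters into two sets and checking each is uniform (simpler).

-- ===== PORT A =====
-- the 'for i in range(0, len(s)-2)' loop with its early 'return False'
def checkLoop (l : List Char) : List Int → Bool
  | [] => true
  | i :: rest =>
    if ¬ (PySem.List.pyGetD l i ' ' == PySem.List.pyGetD l (i + 2) ' ') then false
    else checkLoop l rest

def check (s : String) : Bool :=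
  let l := s.toList
  let unit : PySem.Set Char := PySem.Set.ofList l
  if (unit.length : Int) > 2 then false
  else checkLoop l (PySem.List.pyRange 0 ((l.length : Int) - 2) 1)

-- ===== PORT B =====
def check_alt (s : String) : Bool :=
  let p := (PySem.List.enumerate s.toList 0).foldl
      (fun (st : PySem.Set Char × PySem.Set Char) ic =>
        if ic.1 % 2 = 0 then (st.1.add ic.2, st.2) else (st.1, st.2.add ic.2))
      (PySem.Set.empty, PySem.Set.empty)
  decide (p.1.length ≤ 1) && decide (p.2.length ≤ 1)

-- ===== PRECONDITION & SPEC =====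
def Spec_check (s : String) (out : Bool) : Prop := out = check_alt s
instance (s : String) (out : Bool) : Decidable (Spec_check s out) := by unfold Spec_check; infer_instance

-- ===== CLAIM (what is proved, stated in full; the proofs are below) =====
def Claim_equal_check : Prop := ∀ (s : String), Dom_check s → Spec_check s (check s)

-- ===== LEMMAS AND PROOFS =====

-- the even-indexed subsequence (every second element, starting at the head)
def every2 {α : Type} : List α → List α
  | [] => []
  | [x] => [x]
  | x :: _ :: r => x :: every2 r

-- "all elements equal" predicate
def AllEq {α : Type} (xs : List α) : Prop := ∀ a ∈ xs, ∀ b ∈ xs, a = b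

-- "the step-2 condition of A's loop"
def StepOK (l : List Char) : Prop := ∀ k : Nat, k + 2 < l.length → l.getD k ' ' = l.getD (k + 2) ' '

theorem every2_cons_cons {α : Type} (x y : α) (r : List α) :
    every2 (x :: y :: r) = x :: every2 r := rfl

theorem mem_every2 {α : Type} (l : List α) (a : α) :
    a ∈ every2 l ↔ ∃ j : Nat, ∃ h : 2 * j < l.length, l[2 * j] = a := by
  induction l using every2.induct with
  | case1 => simp [every2]
  | case2 x =>
      simp only [every2, List.mem_singleton]
      constructor
      · rintro rfl; exact ⟨0, by simp, by simp⟩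
      · rintro ⟨j, hj, hval⟩
        simp only [List.length_singleton] at hj
        have hj0 : j = 0 := by omega
        subst hj0
        simpa using hval.symm
  | case3 x y r ih =>
      simp only [every2, List.mem_cons, ih]
      constructor
      · rintro (rfl | ⟨j, hj, hval⟩)
        · exact ⟨0, by simp, by simp⟩
        · refine ⟨j + 1, by simp; omega, ?_⟩
          have : 2 * (j + 1) = 2 * j + 1 + 1 := by ring
          simp only [this, List.getElem_cons_succ]
          exact hval
      · rintro ⟨j, hj, hval⟩
        match j with
        | 0 => left; simpa using hval.symm
        | j + 1 =>
          right
          refine ⟨j, by simp at hj; omega, ?_⟩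
          simp only [show 2 * (j + 1) = 2 * j + 1 + 1 from by ring,
            List.getElem_cons_succ] at hval
          exact hval

theorem mem_every2_tail (l : List Char) (a : Char) :
    a ∈ every2 l.tail ↔ ∃ j : Nat, ∃ h : 2 * j + 1 < l.length, l[2 * j + 1] = a := by
  rcases l with _ | ⟨x, r⟩
  · simp [every2]
  · simp only [List.tail_cons]
    rw [mem_every2]
    constructor
    · rintro ⟨j, hj, hval⟩
      exact ⟨j, by simp; omega, by simpa using hval⟩
    · rintro ⟨j, hj, hval⟩
      exact ⟨j, by simp at hj ⊢; omega, by simpa using hval⟩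

-- chaining A's step condition: l[k] = l[k + 2*m]
theorem stepOK_chain (l : List Char) (h : StepOK l) :
    ∀ m k : Nat, k + 2 * m < l.length → l.getD k ' ' = l.getD (k + 2 * m) ' ' := by
  intro m
  induction m with
  | zero => intro k _; rfl
  | succ m ih =>
      intro k hk
      have h1 : k + 2 < l.length := by omega
      have := h k h1
      have h2 : (k + 2) + 2 * m < l.length := by omega
      have := this.trans (ih (k + 2) h2)
      have heq : k + 2 + 2 * m = k + 2 * (m + 1) := by ring
      rwa [heq] at this

theorem getD_eq_getElem (l : List Char) (k : Nat) (h : k < l.length) :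
    l.getD k ' ' = l[k] := by
  simp [List.getD, List.getElem?_eq_getElem h]

theorem stepOK_iff (l : List Char) :
    StepOK l ↔ AllEq (every2 l) ∧ AllEq (every2 l.tail) := by
  constructor
  · intro h
    constructor
    · intro a ha b hb
      rw [mem_every2] at ha hb
      obtain ⟨i, hi, hai⟩ := ha
      obtain ⟨j, hj, hbj⟩ := hb
      rcases Nat.le_total i j with hle | hle
      · have := stepOK_chain l h (j - i) (2 * i) (by omega)
        rw [getD_eq_getElem l _ hi, show 2 * i + 2 * (j - i) = 2 * j by omega,
            getD_eq_getElem l _ hj] at this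
        rw [← hai, ← hbj, this]
      · have := stepOK_chain l h (i - j) (2 * j) (by omega)
        rw [getD_eq_getElem l _ hj, show 2 * j + 2 * (i - j) = 2 * i by omega,
            getD_eq_getElem l _ hi] at this
        rw [← hai, ← hbj, this]
    · intro a ha b hb
      rw [mem_every2_tail] at ha hb
      obtain ⟨i, hi, hai⟩ := ha
      obtain ⟨j, hj, hbj⟩ := hb
      rcases Nat.le_total i j with hle | hle
      · have := stepOK_chain l h (j - i) (2 * i + 1) (by omega)
        rw [getD_eq_getElem l _ hi, show 2 * i + 1 + 2 * (j - i) = 2 * j + 1 by omega,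
            getD_eq_getElem l _ hj] at this
        rw [← hai, ← hbj, this]
      · have := stepOK_chain l h (i - j) (2 * j + 1) (by omega)
        rw [getD_eq_getElem l _ hj, show 2 * j + 1 + 2 * (i - j) = 2 * i + 1 by omega,
            getD_eq_getElem l _ hi] at this
        rw [← hai, ← hbj, this]
  · rintro ⟨he, ho⟩ k hk
    rcases Nat.even_or_odd k with ⟨j, hje⟩ | ⟨j, hjo⟩
    · have h1 : 2 * j < l.length := by omega
      have h2 : 2 * (j + 1) < l.length := by omega
      have m1 : l[2 * j] ∈ every2 l := (mem_every2 l _).mpr ⟨j, h1, rfl⟩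
      have m2 : l[2 * (j + 1)] ∈ every2 l := (mem_every2 l _).mpr ⟨j + 1, h2, rfl⟩
      have := he _ m1 _ m2
      rw [getD_eq_getElem l k (by omega), getD_eq_getElem l (k + 2) (by omega)]
      have e1 : k = 2 * j := by omega
      subst e1
      simp only [show 2 * j + 2 = 2 * (j + 1) from by ring]
      exact this
    · have h1 : 2 * j + 1 < l.length := by omega
      have h2 : 2 * (j + 1) + 1 < l.length := by omega
      have m1 : l[2 * j + 1] ∈ every2 l.tail := (mem_every2_tail l _).mpr ⟨j, h1, rfl⟩
      have m2 : l[2 * (j + 1) + 1] ∈ every2 l.tail := (mem_every2_tail l _).mpr ⟨j + 1, h2, rfl⟩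
      have := ho _ m1 _ m2
      rw [getD_eq_getElem l k (by omega), getD_eq_getElem l (k + 2) (by omega)]
      have e1 : k = 2 * j + 1 := by omega
      subst e1
      simp only [show 2 * j + 1 + 2 = 2 * (j + 1) + 1 from by ring]
      exact this

-- A's loop returns true iff the pyGetD equation holds at every listed index
theorem checkLoop_true_iff (l : List Char) (idx : List Int) :
    checkLoop l idx = true ↔
      ∀ i ∈ idx, PySem.List.pyGetD l i ' ' = PySem.List.pyGetD l (i + 2) ' ' := by
  induction idx with
  | nil => simp [checkLoop]
  | cons i rest ih =>
      simp only [checkLoop, List.mem_cons]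
      by_cases h : PySem.List.pyGetD l i ' ' = PySem.List.pyGetD l (i + 2) ' '
      · simp [h, ih]
      · simp [h]

theorem checkLoop_range_iff (l : List Char) :
    checkLoop l (PySem.List.pyRange 0 ((l.length : Int) - 2) 1) = true ↔ StepOK l := by
  rw [checkLoop_true_iff]
  constructor
  · intro h k hk
    have hmem : (k : Int) ∈ PySem.List.pyRange 0 ((l.length : Int) - 2) 1 := by
      rw [PySem.List.mem_pyRange_one]
      constructor
      · exact Int.natCast_nonneg k
      · omega
    have := h _ hmem
    have e2 : ((k : Int) + 2) = ((k + 2 : Nat) : Int) := by push_cast; ring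
    rw [e2] at this
    rw [PySem.List.pyGetD_natCast, PySem.List.pyGetD_natCast] at this
    exact this
  · intro h i hi
    rw [PySem.List.mem_pyRange_one] at hi
    obtain ⟨h0, hlt⟩ := hi
    obtain ⟨k, rfl⟩ := Int.eq_ofNat_of_zero_le h0
    have hk : k + 2 < l.length := by omega
    have := h k hk
    have e2 : ((k : Int) + 2) = ((k + 2 : Nat) : Int) := by push_cast; ring
    rw [e2, PySem.List.pyGetD_natCast, PySem.List.pyGetD_natCast]
    exact this

-- each element of l lies in one of the two parity subsequences
theorem mem_parity (l : List Char) (a : Char) (ha : a ∈ l) :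
    a ∈ every2 l ∨ a ∈ every2 l.tail := by
  rw [List.mem_iff_getElem] at ha
  obtain ⟨k, hk, hval⟩ := ha
  rcases Nat.even_or_odd k with ⟨j, hje⟩ | ⟨j, hjo⟩
  · left
    have e1 : k = 2 * j := by omega
    subst e1
    exact (mem_every2 l a).mpr ⟨j, by omega, hval⟩
  · right
    have e1 : k = 2 * j + 1 := by omega
    subst e1
    exact (mem_every2_tail l a).mpr ⟨j, by omega, hval⟩

-- a set/nodup list all of whose elements take at most two values has length ≤ 2
theorem nodup_length_le_two (xs : List Char) (x y : Char) (hnd : xs.Nodup)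
    (h : ∀ a ∈ xs, a = x ∨ a = y) : xs.length ≤ 2 := by
  match xs, hnd with
  | [], _ => simp
  | [_], _ => simp
  | [_, _], _ => simp
  | a :: b :: c :: r, hnd =>
    exfalso
    simp only [List.nodup_cons, List.mem_cons] at hnd
    rcases h a (by simp) with rfl | rfl <;>
      rcases h b (by simp) with rfl | rfl <;>
      rcases h c (by simp) with rfl | rfl <;> tauto

theorem allEq_parity_set_le_two (l : List Char)
    (he : AllEq (every2 l)) (ho : AllEq (every2 l.tail)) :
    (PySem.Set.ofList l).length ≤ 2 := by
  rcases l with _ | ⟨x, r⟩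
  · simp [PySem.Set.ofList]
  rcases r with _ | ⟨y, t⟩
  · apply nodup_length_le_two _ x x (PySem.Set.nodup_ofList _)
    intro a ha
    rw [PySem.Set.mem_ofList] at ha
    simp at ha; left; exact ha
  · apply nodup_length_le_two _ x y (PySem.Set.nodup_ofList _)
    intro a ha
    rw [PySem.Set.mem_ofList] at ha
    rcases mem_parity _ a ha with hm | hm
    · left; exact he a hm x (by simp [every2_cons_cons])
    · right
      have hy : y ∈ every2 (x :: y :: t).tail := by simp [List.tail]; rcases t with _ | ⟨z, t⟩ <;> simp [every2]
      exact ho a hm y hy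

-- the set built by B's collecting loop
theorem foldl_enum_parity (l : List Char) (n : Int) (e o : PySem.Set Char) :
    (PySem.List.enumerate l n).foldl
        (fun (st : PySem.Set Char × PySem.Set Char) ic =>
          if ic.1 % 2 = 0 then (st.1.add ic.2, st.2) else (st.1, st.2.add ic.2))
        (e, o) =
      if n % 2 = 0 then (PySem.Set.update e (every2 l), PySem.Set.update o (every2 l.tail))
      else (PySem.Set.update e (every2 l.tail), PySem.Set.update o (every2 l)) := by
  induction l using every2.induct generalizing n e o with
  | case1 =>
      by_cases hn : n % 2 = 0
      · simp only [PySem.List.enumerate_nil, List.foldl_nil, if_pos hn]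
        simp [every2, PySem.Set.update]
      · simp only [PySem.List.enumerate_nil, List.foldl_nil, if_neg hn]
        simp [every2, PySem.Set.update]
  | case2 x =>
      by_cases hn : n % 2 = 0
      · simp only [PySem.List.enumerate_cons, PySem.List.enumerate_nil, List.foldl_cons,
          List.foldl_nil, if_pos hn]
        simp [every2, PySem.Set.update]
      · simp only [PySem.List.enumerate_cons, PySem.List.enumerate_nil, List.foldl_cons,
          List.foldl_nil, if_neg hn]
        simp [every2, PySem.Set.update]
  | case3 x y r ih =>
      have hn2 : (n + 1 + 1) % 2 = n % 2 := by omega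
      have ht : every2 (y :: r) = y :: every2 r.tail := by
        rcases r with _ | ⟨z, t⟩ <;> simp [every2]
      by_cases hn : n % 2 = 0
      · have hn1 : ¬ ((n + 1) % 2 = 0) := by omega
        simp only [PySem.List.enumerate_cons, List.foldl_cons, if_pos hn, if_neg hn1, ih, hn2,
          every2_cons_cons, List.tail_cons, ht]
        simp [PySem.Set.update]
      · have hn1 : (n + 1) % 2 = 0 := by omega
        simp only [PySem.List.enumerate_cons, List.foldl_cons, if_neg hn, if_pos hn1, ih, hn2,
          every2_cons_cons, List.tail_cons, ht]
        simp [PySem.Set.update]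

theorem update_empty (xs : List Char) :
    PySem.Set.update ([] : PySem.Set Char) xs = PySem.Set.ofList xs := rfl

theorem check_alt_eq (s : String) :
    check_alt s = (decide ((PySem.Set.ofList (every2 s.toList)).length ≤ 1) &&
                   decide ((PySem.Set.ofList (every2 s.toList.tail)).length ≤ 1)) := by
  unfold check_alt
  rw [show (PySem.Set.empty : PySem.Set Char) = [] from rfl,
    foldl_enum_parity s.toList 0 [] []]
  norm_num [update_empty]

theorem ofList_length_le_one_iff (xs : List Char) :
    (PySem.Set.ofList xs).length ≤ 1 ↔ AllEq xs := by
  constructor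
  · intro h a ha b hb
    have ha' := (PySem.Set.mem_ofList (xs := xs) (y := a)).mpr ha
    have hb' := (PySem.Set.mem_ofList (xs := xs) (y := b)).mpr hb
    match hs : PySem.Set.ofList xs with
    | [] => rw [hs] at ha'; simp at ha'
    | [c] => rw [hs] at ha' hb'; simp at ha' hb'; rw [ha', hb']
    | c :: d :: t => rw [hs] at h; simp at h
  · intro h
    match hs : PySem.Set.ofList xs with
    | [] => simp
    | [c] => simp
    | c :: d :: t =>
      exfalso
      have hnd := PySem.Set.nodup_ofList (xs := xs)
      rw [hs] at hnd
      simp only [List.nodup_cons, List.mem_cons] at hnd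
      have hc : c ∈ xs := (PySem.Set.mem_ofList _ _).mp (by rw [hs]; simp)
      have hd : d ∈ xs := (PySem.Set.mem_ofList _ _).mp (by rw [hs]; simp)
      exact hnd.1 (Or.inl (h c hc d hd))

-- ===== VERDICT (by name: the statement is the Claim_ definition above) =====
theorem check_spec : Claim_equal_check := by
  intro s _
  unfold Spec_check
  rw [check_alt_eq]
  unfold check
  by_cases hstep : StepOK s.toList
  · have hEO := (stepOK_iff s.toList).mp hstep
    have hset := allEq_parity_set_le_two s.toList hEO.1 hEO.2
    have hguard : ¬ (((PySem.Set.ofList s.toList).length : Int) > 2) := by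
      omega
    simp only [hguard, if_false]
    rw [(checkLoop_range_iff s.toList).mpr hstep]
    simp [ofList_length_le_one_iff, hEO.1, hEO.2]
  · have hEO : ¬ (AllEq (every2 s.toList) ∧ AllEq (every2 s.toList.tail)) := by
      rw [← stepOK_iff]; exact hstep
    have hB : (decide ((PySem.Set.ofList (every2 s.toList)).length ≤ 1) &&
              decide ((PySem.Set.ofList (every2 s.toList.tail)).length ≤ 1)) = false := by
      rcases Classical.not_and_iff_not_or_not.mp hEO with h | h
      · have := (ofList_length_le_one_iff (every2 s.toList)).not.mpr h
        simp [this]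
      · have := (ofList_length_le_one_iff (every2 s.toList.tail)).not.mpr h
        simp [this]
    rw [hB]
    by_cases hguard : (((PySem.Set.ofList s.toList).length : Int) > 2)
    · simp [hguard]
    · simp only [hguard, if_false]
      rw [← Bool.not_eq_true, checkLoop_range_iff]
      exact hstep
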